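-- pv_equiv track=rewrite | github.com/pauloctrsarmento-droid/Clip-tutor-final | scripts/paper-parser/canonical.py | _get_q_suffix
-- ===== SOURCE A (Python) =====
-- from typing import Optional, List, Tuple
--
-- def _get_q_suffix(q_id: str) -> Optional[str]:
--     """Extract q-suffix from full question ID, stripping _alt."""
--     parts = q_id.split("_")
--     suffix_parts = []
--     found = False
--     for p in parts:
--         if not found and p.startswith("q") and len(p) > 1 and p[1:2].isdigit():
--             found = True
--         if found:
--             if p.startswith("alt"):
--                 continue
--             suffix_parts.append(p)
--     return "_".join(suffix_parts) if suffix_parts else None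
-- ===== SOURCE B (Python) =====
-- from typing import Optional
--
-- def _get_q_suffix(q_id: str) -> Optional[str]:
--     """Extract q-suffix from full question ID, stripping _alt.
--
--     Single backwards pass: walk the parts right-to-left keeping the joined
--     string of the non-alt parts seen so far; every q-digit token proposes
--     itself + that tail as the answer, the leftmost proposal wins."""
--     ans = None
--     tail = ""
--     for p in reversed(q_id.split("_")):
--         if p.startswith("q") and len(p) > 1 and p[1:2].isdigit():
--             ans = p + tail
--         if not p.startswith("alt"):
--             tail = "_" + p + tail
--     return ans
-- ===== Notes on version B (the rewrite author's own statement) =====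
-- stated objective: alternative
-- what changed: A's forward flag-driven loop that collects a list of parts and joins it is replaced by a single right-to-left pass that builds the joined suffix string directly as an accumulator; each q-digit token proposes itself plus the accumulated tail and the leftmost proposal wins, so no flag, no list and no join are needed.
import Mathlib
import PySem

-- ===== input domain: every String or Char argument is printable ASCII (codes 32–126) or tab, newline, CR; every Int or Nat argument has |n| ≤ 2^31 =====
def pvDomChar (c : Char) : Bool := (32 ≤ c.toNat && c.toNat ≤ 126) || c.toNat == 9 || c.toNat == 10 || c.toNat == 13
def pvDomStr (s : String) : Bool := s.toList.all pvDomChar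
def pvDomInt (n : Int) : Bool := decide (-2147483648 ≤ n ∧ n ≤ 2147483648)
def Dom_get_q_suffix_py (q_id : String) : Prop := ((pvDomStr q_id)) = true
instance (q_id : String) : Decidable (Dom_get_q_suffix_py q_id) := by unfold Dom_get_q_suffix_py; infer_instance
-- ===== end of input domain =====

-- B replaces A's forward flag-driven collect-then-join loop by a single right-to-left pass that
-- builds the joined suffix string directly (objective: alternative; same result, no flag/list/join).

-- shared token predicate: p.startswith("q") and len(p) > 1 and p[1:2].isdigit()
def pvQStart (p : List Char) : Bool :=
  PySem.Chars.startswith p ['q'] && decide (1 < PySem.Chars.len p) &&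
  PySem.Chars.strIsdigit (PySem.Chars.slice p (some 1) (some 2))

-- ===== PORT A =====
-- A's loop body: state = (suffix_parts, found)
def pvStepA (acc : List (List Char) × Bool) (p : List Char) : List (List Char) × Bool :=
  let found := if !acc.2 && pvQStart p then true else acc.2
  if found then
    if PySem.Chars.startswith p ['a', 'l', 't'] then (acc.1, found)
    else (acc.1 ++ [p], found)
  else (acc.1, found)

def get_q_suffix_py (q_id : String) : Option String :=
  let parts := PySem.Chars.splitOn q_id.toList ['_']
  let st := parts.foldl pvStepA ([], false)
  if st.1.isEmpty then none else some (String.ofList (PySem.Chars.join ['_'] st.1))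

-- ===== PORT B =====
-- B's loop body over reversed(parts): state = (ans, tail)
def pvStepB (st : Option (List Char) × List Char) (p : List Char) : Option (List Char) × List Char :=
  (if pvQStart p then some (p ++ st.2) else st.1,
   if PySem.Chars.startswith p ['a', 'l', 't'] then st.2 else '_' :: (p ++ st.2))

def get_q_suffix_py_alt (q_id : String) : Option String :=
  let parts := PySem.Chars.splitOn q_id.toList ['_']
  let st := parts.reverse.foldl pvStepB (none, [])
  match st.1 with
  | none => none
  | some cs => some (String.ofList cs)

-- ===== PRECONDITION & SPEC =====
def Spec_get_q_suffix_py (q_id : String) (out : Option String) : Prop := out = get_q_suffix_py_alt q_id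
instance (q_id : String) (out : Option String) : Decidable (Spec_get_q_suffix_py q_id out) := by unfold Spec_get_q_suffix_py; infer_instance

-- ===== CLAIM =====
def Claim_equal_get_q_suffix_py : Prop := ∀ (q_id : String), Dom_get_q_suffix_py q_id → Spec_get_q_suffix_py q_id (get_q_suffix_py q_id)

-- ===== LEMMAS AND PROOFS =====
-- common characterisation used by both sides
def pvTail (l : List (List Char)) : List Char :=
  (l.filter (fun p => !PySem.Chars.startswith p ['a', 'l', 't'])).flatMap (fun p => '_' :: p)

def pvAns : List (List Char) → Option (List Char)
  | [] => none
  | p :: rest => if pvQStart p then some (p ++ pvTail rest) else pvAns rest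

theorem pvQStart_not_alt (p : List Char) (h : pvQStart p = true) :
    PySem.Chars.startswith p ['a', 'l', 't'] = false := by
  have hq : PySem.Chars.startswith p ['q'] = true := by
    simp only [pvQStart, Bool.and_eq_true] at h; exact h.1.1
  rw [PySem.Chars.startswith_iff] at hq
  by_contra hne
  rw [Bool.not_eq_false, PySem.Chars.startswith_iff] at hne
  obtain ⟨t1, ht1⟩ := hq
  obtain ⟨t2, ht2⟩ := hne
  rw [← ht1] at ht2
  simp at ht2

theorem pvJoin_cons (p : List Char) (l : List (List Char)) :
    PySem.Chars.join ['_'] (p :: l) = p ++ l.flatMap (fun x => '_' :: x) := by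
  induction l generalizing p with
  | nil => simp [PySem.Chars.join_singleton]
  | cons q l ih => rw [PySem.Chars.join_cons_cons, ih q]; simp

-- once found = true, A's loop just filters out "alt"-tokens and appends
theorem pvFoldA_found (l : List (List Char)) (acc : List (List Char)) :
    l.foldl pvStepA (acc, true) =
      (acc ++ l.filter (fun p => !PySem.Chars.startswith p ['a', 'l', 't']), true) := by
  induction l generalizing acc with
  | nil => simp
  | cons p l ih =>
    simp only [List.foldl_cons, pvStepA, List.filter_cons]
    by_cases h : PySem.Chars.startswith p ['a', 'l', 't'] = true <;> simp [h, ih]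

-- A's whole pipeline computes pvAns
theorem pvFoldA_main (l : List (List Char)) :
    (if (l.foldl pvStepA ([], false)).1.isEmpty then none
     else some (PySem.Chars.join ['_'] (l.foldl pvStepA ([], false)).1)) = pvAns l := by
  induction l with
  | nil => simp [pvAns]
  | cons p l ih =>
    by_cases h : pvQStart p = true
    · simp only [List.foldl_cons, pvStepA, h, pvQStart_not_alt p h]
      simp only [Bool.not_false, Bool.and_true, if_true, Bool.false_eq_true, if_false,
        List.nil_append, pvFoldA_found, pvAns, h, if_true]
      simp [pvJoin_cons, pvTail]
    · simp only [List.foldl_cons, pvStepA, h]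
      simp only [Bool.and_false, Bool.false_eq_true, if_false]
      rw [show pvAns (p :: l) = pvAns l from by simp [pvAns, h]]
      exact ih

-- B's reversed fold computes (pvAns, pvTail)
theorem pvFoldB_main (l : List (List Char)) :
    l.reverse.foldl pvStepB (none, []) = (pvAns l, pvTail l) := by
  rw [List.foldl_reverse]
  induction l with
  | nil => simp [pvAns, pvTail]
  | cons p l ih =>
    rw [List.foldr_cons, ih]
    simp only [pvStepB, pvAns, pvTail, List.filter_cons]
    by_cases h : PySem.Chars.startswith p ['a', 'l', 't'] = true <;> simp [h]

-- ===== VERDICT =====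
theorem get_q_suffix_py_spec : Claim_equal_get_q_suffix_py := by
  intro q_id _
  unfold Spec_get_q_suffix_py get_q_suffix_py get_q_suffix_py_alt
  simp only [pvFoldB_main]
  rw [← pvFoldA_main (PySem.Chars.splitOn q_id.toList ['_'])]
  cases h : ((PySem.Chars.splitOn q_id.toList ['_']).foldl pvStepA ([], false)).1.isEmpty <;> simp [h]
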